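-- pv_equiv track=rewrite | github.com/bobreddy2009/111 | PythonConcepts/divisble_7_no_3or5.py | divisble_7
-- ===== SOURCE A (Python) =====
-- def divisble_7(num):
--     n = 0
--     divisibility = []
--     while True:
--         n+=1
--         if len(divisibility) == num:
--             break
--         if n%3 == 0 or n%5 == 0:
--             pass
--         elif n%7 == 0:
--             divisibility.append(n)
--             yield n
-- ===== SOURCE B (Python) =====
-- _OFFS = (7, 14, 28, 49, 56, 77, 91, 98)
--
-- def divisble_7(num):
--     # Closed form: the pattern of multiples of 7 not divisible by 3 or 5
--     # repeats with period lcm(3,5,7) = 105, eight values per period, so the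
--     # i-th yielded value is 105*(i//8) + _OFFS[i%8].
--     for i in range(num):
--         yield 105 * (i // 8) + _OFFS[i % 8]
-- ===== Notes on version B (the rewrite author's own statement) =====
-- stated objective: faster
-- what changed: B replaces A's scan of every integer (testing %3/%5/%7 and appending to a list) by a closed form: the answers repeat with period lcm(3,5,7)=105, eight per period, so the i-th value is computed directly as 105*(i//8) + OFFS[i%8].
import Mathlib
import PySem

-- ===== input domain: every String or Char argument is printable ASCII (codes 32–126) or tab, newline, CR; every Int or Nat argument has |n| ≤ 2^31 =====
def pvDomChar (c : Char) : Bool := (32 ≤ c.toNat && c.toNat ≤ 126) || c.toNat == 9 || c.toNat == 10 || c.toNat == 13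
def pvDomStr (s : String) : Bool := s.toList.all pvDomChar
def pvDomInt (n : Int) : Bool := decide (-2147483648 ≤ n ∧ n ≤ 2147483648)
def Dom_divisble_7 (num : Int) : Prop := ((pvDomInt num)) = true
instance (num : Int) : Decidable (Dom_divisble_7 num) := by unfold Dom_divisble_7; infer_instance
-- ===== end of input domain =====

-- B replaces A's integer scan by the closed form 105*(i//8) + OFFS[i%8] (period-105 pattern).

-- ===== PORT A =====
-- A's `while True` loop: n += 1; break when len(acc) == num; skip when n % 3 == 0 or n % 5 == 0;
-- else if n % 7 == 0 append/yield n.  Ported with a fuel counter; the fuel 21*num.toNat + 21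
-- strictly exceeds the number of iterations before the break for every num ≥ 0 (at most 21
-- single steps separate consecutive yielded values), so on Pre_ the port returns exactly the
-- sequence A yields.
def divisble_7_loop : Nat → Int → List Int → Int → List Int
  | 0, _, acc, _ => acc
  | fuel+1, n, acc, num =>
    if (acc.length : Int) = num then acc
    else if (n+1) % 3 = 0 ∨ (n+1) % 5 = 0 then divisble_7_loop fuel (n+1) acc num
    else if (n+1) % 7 = 0 then divisble_7_loop fuel (n+1) (acc ++ [n+1]) num
    else divisble_7_loop fuel (n+1) acc num

def divisble_7 (num : Int) : List Int := divisble_7_loop (21 * num.toNat + 21) 0 [] num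

-- ===== PORT B =====
-- Source B: for i in range(num): yield 105 * (i // 8) + _OFFS[i % 8].
-- _OFFS[i % 8] is Python tuple indexing; i % 8 ∈ [0,8) so it never raises, ported as pyGet? ... .getD 0 (exact here).
def divOffs : List Int := [7, 14, 28, 49, 56, 77, 91, 98]

def divisble_7_alt (num : Int) : List Int :=
  (PySem.List.pyRange 0 num 1).map (fun i =>
    105 * (PySem.Int.floordiv i 8) + (PySem.List.pyGet? divOffs (PySem.Int.mod i 8)).getD 0)

-- ===== PRECONDITION & SPEC =====
-- Pre_ excludes num < 0, on which A's generator never terminates (len(divisibility) == num is never reached), so A returns no value there.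
def Pre_divisble_7 (num : Int) : Prop := 0 ≤ num
instance (num : Int) : Decidable (Pre_divisble_7 num) := by unfold Pre_divisble_7; infer_instance
def pvWitness_divisble_7 : Int := 3

def Spec_divisble_7 (num : Int) (out : List Int) : Prop := out = divisble_7_alt num
instance (num : Int) (out : List Int) : Decidable (Spec_divisble_7 num out) := by unfold Spec_divisble_7; infer_instance

-- ===== CLAIM (what is proved, stated in full; the proofs are below) =====
def Claim_equal_divisble_7 : Prop := ∀ (num : Int), Dom_divisble_7 num → Pre_divisble_7 num → Spec_divisble_7 num (divisble_7 num)

-- ===== LEMMAS AND PROOFS =====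

-- Proof-side closed form: offAt r = divOffs[r] and pvValue c = the c-th yielded value;
-- pvPrev c = the loop variable n just after the c-th value was emitted (0 before the first).
def offAt (r : Int) : Int :=
  if r = 0 then 7 else if r = 1 then 14 else if r = 2 then 28 else if r = 3 then 49
  else if r = 4 then 56 else if r = 5 then 77 else if r = 6 then 91 else 98

def pvValue (c : Int) : Int := 105 * (c / 8) + offAt (c % 8)

def pvPrev (c : Int) : Int := if c = 0 then 0 else pvValue (c - 1)

lemma pvValue_eq (c q r : Int) (h0 : 0 ≤ r) (h8 : r < 8) (hd : c = 8*q + r) :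
    pvValue c = 105*q + offAt r := by
  have h1 : c / 8 = q := by omega
  have h2 : c % 8 = r := by omega
  rw [pvValue, h1, h2]

-- One A-iteration on a non-multiple of 7 just advances n (acc unchanged), whatever %3/%5 say.
lemma step_skip (f : Nat) (n : Int) (acc : List Int) (num : Int)
    (hlen : (acc.length : Int) ≠ num) (h7 : (n+1) % 7 ≠ 0) :
    divisble_7_loop (f+1) n acc num = divisble_7_loop f (n+1) acc num := by
  simp only [divisble_7_loop, if_neg hlen]
  by_cases h : (n+1) % 3 = 0 ∨ (n+1) % 5 = 0
  · rw [if_pos h]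
  · rw [if_neg h, if_neg h7]

-- Seven A-iterations from a multiple of 7 amount to one step across the next multiple of 7.
lemma step_seven (f : Nat) (n : Int) (acc : List Int) (num : Int)
    (h7 : n % 7 = 0) (hlen : (acc.length : Int) ≠ num) :
    divisble_7_loop (f+7) n acc num =
      if (n+7) % 3 = 0 ∨ (n+7) % 5 = 0 then divisble_7_loop f (n+7) acc num
      else divisble_7_loop f (n+7) (acc ++ [(n+7)]) num := by
  rw [show f+7 = (f+1)+6 from rfl, step_skip _ _ _ _ hlen (by omega)]
  rw [show f+1+5 = (f+1)+5 from rfl, step_skip _ _ _ _ hlen (by omega)]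
  rw [show f+1+4 = (f+1)+4 from rfl, step_skip _ _ _ _ hlen (by omega)]
  rw [show f+1+3 = (f+1)+3 from rfl, step_skip _ _ _ _ hlen (by omega)]
  rw [show f+1+2 = (f+1)+2 from rfl, step_skip _ _ _ _ hlen (by omega)]
  rw [show f+1+1 = (f+1)+1 from rfl, step_skip _ _ _ _ hlen (by omega)]
  simp only [divisble_7_loop, if_neg hlen]
  have e : n+1+1+1+1+1+1+1 = n+7 := by ring
  rw [e]
  by_cases h : (n+7) % 3 = 0 ∨ (n+7) % 5 = 0
  · rw [if_pos h, if_pos h]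
  · rw [if_neg h, if_neg h, if_pos (by omega : (n+7) % 7 = 0)]

-- The statement proved by induction: from the state after c emitted values, with fuel
-- 21*m + 21 + f, A's loop emits exactly the next m closed-form values.
def pvStmt (m : Nat) : Prop := ∀ (f : Nat) (c : Int) (acc : List Int),
  0 ≤ c → (acc.length : Int) = c →
  divisble_7_loop (21*m + 21 + f) (pvPrev c) acc (c + m) =
    acc ++ (List.range m).map (fun j : Nat => pvValue (c + (j : Int)))

lemma block_succ (c : Int) (m : Nat) :
    (List.range (m+1)).map (fun j : Nat => pvValue (c + (j : Int))) =
      pvValue c :: (List.range m).map (fun j : Nat => pvValue ((c+1) + (j : Int))) := by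
  rw [List.range_succ_eq_map, List.map_cons, List.map_map]
  simp only [Nat.cast_zero, add_zero, List.cons.injEq, true_and]
  apply List.map_congr_left
  intro j _
  simp only [Function.comp]
  congr 1
  push_cast
  ring

-- Common tail of every case of the induction step: after emitting v = pvValue c.
lemma finish_emit (m f : Nat) (c : Int) (acc : List Int)
    (hc : 0 ≤ c) (hlen : (acc.length : Int) = c) (ih : pvStmt m)
    (v : Int) (hv : v = pvValue c) :
    divisble_7_loop (21*m + 21 + f) v (acc ++ [v]) (c + ((m : Int) + 1)) =
      acc ++ (List.range (m+1)).map (fun j : Nat => pvValue (c + (j : Int))) := by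
  have h1 : pvPrev (c+1) = v := by
    rw [pvPrev, if_neg (by omega)]
    simpa using hv.symm
  have h2 : c + ((m : Int) + 1) = (c+1) + (m : Int) := by ring
  have h3 : (((acc ++ [v]).length : Nat) : Int) = c + 1 := by
    simp [hlen]
  have hih := ih f (c+1) (acc ++ [v]) (by omega) h3
  rw [h1] at hih
  rw [h2, hih, block_succ]
  simp [hv]

lemma A_run : ∀ m : Nat, pvStmt m := by
  intro m
  induction m with
  | zero =>
    intro f c acc hc hlen
    rw [show 21*0 + 21 + f = (20 + f) + 1 from by omega]
    simp only [divisble_7_loop]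
    rw [if_pos (by push_cast; omega)]
    simp
  | succ m ih =>
    intro f c acc hc hlen
    have hne : (acc.length : Int) ≠ c + ((m : Int) + 1) := by omega
    push_cast
    by_cases hc0 : c = 0
    · subst hc0
      have hn : pvPrev 0 = 0 := by simp [pvPrev]
      rw [hn]
      rw [show 21*(m+1) + 21 + f = (21*m + 21 + (f + 14)) + 7 from by omega]
      rw [step_seven _ _ _ _ (by omega) hne]
      rw [if_neg (by omega)]
      have hv : (0:Int) + 7 = pvValue 0 := by
        rw [pvValue_eq 0 0 0 (by omega) (by omega) (by omega)]; norm_num [offAt]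
      exact finish_emit m (f + 14) 0 acc (by omega) hlen ih _ hv
    · obtain ⟨q, r, hq0, hr0, hr8, hdq⟩ :
        ∃ q r : Int, 0 ≤ q ∧ 0 ≤ r ∧ r < 8 ∧ c - 1 = 8*q + r :=
        ⟨(c-1)/8, (c-1)%8, by omega, by omega, by omega, by omega⟩
      interval_cases r
      · -- c - 1 ≡ 0 (mod 8): n = 105q+7, 1 step(s) of 7 to the next yielded value
        have hn : pvPrev c = 105*q + 7 := by
          rw [pvPrev, if_neg hc0, pvValue_eq (c-1) q 0 (by omega) (by omega) (by omega)]; norm_num [offAt]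
        have hv : pvValue c = 105*q + 14 := by
          rw [pvValue_eq c q 1 (by omega) (by omega) (by omega)]; norm_num [offAt]
        rw [hn]
        rw [show 21*(m+1) + 21 + f = (21*m + 21 + (f + 14)) + 7 from by omega]
        rw [step_seven _ _ _ _ (by omega) hne]
        rw [if_neg (by omega)]
        exact finish_emit m (f + 14) c acc (by omega) hlen ih _ (by rw [hv]; ring)
      · -- c - 1 ≡ 1 (mod 8): n = 105q+14, 2 step(s) of 7 to the next yielded value
        have hn : pvPrev c = 105*q + 14 := by
          rw [pvPrev, if_neg hc0, pvValue_eq (c-1) q 1 (by omega) (by omega) (by omega)]; norm_num [offAt]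
        have hv : pvValue c = 105*q + 28 := by
          rw [pvValue_eq c q 2 (by omega) (by omega) (by omega)]; norm_num [offAt]
        rw [hn]
        rw [show 21*(m+1) + 21 + f = ((21*m + 21 + (f + 7)) + 7) + 7 from by omega]
        rw [step_seven _ _ _ _ (by omega) hne]
        rw [if_pos (by omega)]
        rw [step_seven _ _ _ _ (by omega) hne]
        rw [if_neg (by omega)]
        exact finish_emit m (f + 7) c acc (by omega) hlen ih _ (by rw [hv]; ring)
      · -- c - 1 ≡ 2 (mod 8): n = 105q+28, 3 step(s) of 7 to the next yielded value
        have hn : pvPrev c = 105*q + 28 := by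
          rw [pvPrev, if_neg hc0, pvValue_eq (c-1) q 2 (by omega) (by omega) (by omega)]; norm_num [offAt]
        have hv : pvValue c = 105*q + 49 := by
          rw [pvValue_eq c q 3 (by omega) (by omega) (by omega)]; norm_num [offAt]
        rw [hn]
        rw [show 21*(m+1) + 21 + f = (((21*m + 21 + (f + 0)) + 7) + 7) + 7 from by omega]
        rw [step_seven _ _ _ _ (by omega) hne]
        rw [if_pos (by omega)]
        rw [step_seven _ _ _ _ (by omega) hne]
        rw [if_pos (by omega)]
        rw [step_seven _ _ _ _ (by omega) hne]
        rw [if_neg (by omega)]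
        exact finish_emit m (f + 0) c acc (by omega) hlen ih _ (by rw [hv]; ring)
      · -- c - 1 ≡ 3 (mod 8): n = 105q+49, 1 step(s) of 7 to the next yielded value
        have hn : pvPrev c = 105*q + 49 := by
          rw [pvPrev, if_neg hc0, pvValue_eq (c-1) q 3 (by omega) (by omega) (by omega)]; norm_num [offAt]
        have hv : pvValue c = 105*q + 56 := by
          rw [pvValue_eq c q 4 (by omega) (by omega) (by omega)]; norm_num [offAt]
        rw [hn]
        rw [show 21*(m+1) + 21 + f = (21*m + 21 + (f + 14)) + 7 from by omega]
        rw [step_seven _ _ _ _ (by omega) hne]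
        rw [if_neg (by omega)]
        exact finish_emit m (f + 14) c acc (by omega) hlen ih _ (by rw [hv]; ring)
      · -- c - 1 ≡ 4 (mod 8): n = 105q+56, 3 step(s) of 7 to the next yielded value
        have hn : pvPrev c = 105*q + 56 := by
          rw [pvPrev, if_neg hc0, pvValue_eq (c-1) q 4 (by omega) (by omega) (by omega)]; norm_num [offAt]
        have hv : pvValue c = 105*q + 77 := by
          rw [pvValue_eq c q 5 (by omega) (by omega) (by omega)]; norm_num [offAt]
        rw [hn]
        rw [show 21*(m+1) + 21 + f = (((21*m + 21 + (f + 0)) + 7) + 7) + 7 from by omega]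
        rw [step_seven _ _ _ _ (by omega) hne]
        rw [if_pos (by omega)]
        rw [step_seven _ _ _ _ (by omega) hne]
        rw [if_pos (by omega)]
        rw [step_seven _ _ _ _ (by omega) hne]
        rw [if_neg (by omega)]
        exact finish_emit m (f + 0) c acc (by omega) hlen ih _ (by rw [hv]; ring)
      · -- c - 1 ≡ 5 (mod 8): n = 105q+77, 2 step(s) of 7 to the next yielded value
        have hn : pvPrev c = 105*q + 77 := by
          rw [pvPrev, if_neg hc0, pvValue_eq (c-1) q 5 (by omega) (by omega) (by omega)]; norm_num [offAt]
        have hv : pvValue c = 105*q + 91 := by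
          rw [pvValue_eq c q 6 (by omega) (by omega) (by omega)]; norm_num [offAt]
        rw [hn]
        rw [show 21*(m+1) + 21 + f = ((21*m + 21 + (f + 7)) + 7) + 7 from by omega]
        rw [step_seven _ _ _ _ (by omega) hne]
        rw [if_pos (by omega)]
        rw [step_seven _ _ _ _ (by omega) hne]
        rw [if_neg (by omega)]
        exact finish_emit m (f + 7) c acc (by omega) hlen ih _ (by rw [hv]; ring)
      · -- c - 1 ≡ 6 (mod 8): n = 105q+91, 1 step(s) of 7 to the next yielded value
        have hn : pvPrev c = 105*q + 91 := by
          rw [pvPrev, if_neg hc0, pvValue_eq (c-1) q 6 (by omega) (by omega) (by omega)]; norm_num [offAt]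
        have hv : pvValue c = 105*q + 98 := by
          rw [pvValue_eq c q 7 (by omega) (by omega) (by omega)]; norm_num [offAt]
        rw [hn]
        rw [show 21*(m+1) + 21 + f = (21*m + 21 + (f + 14)) + 7 from by omega]
        rw [step_seven _ _ _ _ (by omega) hne]
        rw [if_neg (by omega)]
        exact finish_emit m (f + 14) c acc (by omega) hlen ih _ (by rw [hv]; ring)
      · -- c - 1 ≡ 7 (mod 8): n = 105q+98, 2 step(s) of 7 to the next yielded value
        have hn : pvPrev c = 105*q + 98 := by
          rw [pvPrev, if_neg hc0, pvValue_eq (c-1) q 7 (by omega) (by omega) (by omega)]; norm_num [offAt]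
        have hv : pvValue c = 105*(q+1) + 7 := by
          rw [pvValue_eq c (q+1) 0 (by omega) (by omega) (by omega)]; norm_num [offAt]
        rw [hn]
        rw [show 21*(m+1) + 21 + f = ((21*m + 21 + (f + 7)) + 7) + 7 from by omega]
        rw [step_seven _ _ _ _ (by omega) hne]
        rw [if_pos (by omega)]
        rw [step_seven _ _ _ _ (by omega) hne]
        rw [if_neg (by omega)]
        exact finish_emit m (f + 7) c acc (by omega) hlen ih _ (by rw [hv]; ring)


-- Python tuple indexing _OFFS[r] for 0 ≤ r < 8 agrees with the proof-side offAt.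
lemma pyGet_offs (r : Int) (h0 : 0 ≤ r) (h8 : r < 8) :
    (PySem.List.pyGet? divOffs r).getD 0 = offAt r := by
  interval_cases r <;> decide

-- ===== VERDICT (by name: the statement is the Claim_ definition above) =====
theorem divisble_7_spec : Claim_equal_divisble_7 := by
  intro num _ hpre
  unfold Spec_divisble_7 divisble_7 divisble_7_alt
  have hnum : ((num.toNat : Nat) : Int) = num := by
    unfold Pre_divisble_7 at hpre; omega
  have hA := A_run num.toNat 0 0 [] (by omega) (by simp)
  rw [show pvPrev 0 = 0 from by simp [pvPrev], hnum] at hA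
  simp only [zero_add, List.nil_append, Nat.add_zero] at hA
  rw [hA, PySem.List.pyRange_one, List.map_map]
  simp only [sub_zero]
  apply List.map_congr_left
  intro j _
  simp only [Function.comp, zero_add]
  rw [PySem.Int.floordiv_eq_ediv_of_pos (by norm_num),
      PySem.Int.mod_eq_emod_of_pos (by norm_num),
      pyGet_offs _ (by omega) (by omega), pvValue]
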